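-- pv_equiv track=rewrite | github.com/deltag0/AI-Chess-bot | chess/engine.py | fenConverter
-- ===== SOURCE A (Python) =====
-- def fenConverter(string: str) -> dict[str: str]:
--     """
--     fenConverter converts the string string from fen notation (https://en.wikipedia.org/wiki/Forsyth%E2%80%93Edwards_Notation)
--     into a dictionary whose keys are squares on the chess board such as a8, a7, c3, etc. Uppercase letters denote white pieces
--     while lowercase letters denote black pieces. A 0 means the square is empty. Function will be called every time the board is
--     updated.
--     """
--     boardRows = string.split("/")
--     piecePositions = {}
--     prevNum = 0
--     for row in range(len(boardRows)):
--         for col in range(len(boardRows[row])):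
--             # if element is a digit, add corresponding amount of empty squares on the board, otherwise add the piece
--             if (boardRows[row][col].isdigit()):
--                 for i in range(int(boardRows[row][col])):
--                     piecePositions[chr(ord('a') + prevNum + i) + str(8 - row)] = '0'
--                 prevNum += int(boardRows[row][col])
--                 continue
--             else:
--                 piecePositions[chr(ord('a') + prevNum) + str(8 - row)] = boardRows[row][col]
--                 prevNum += 1
--         prevNum = 0
--     return piecePositions
-- ===== SOURCE B (Python) =====
-- def fenConverter(string: str) -> dict:
--     piecePositions = {}
--     for rowIndex, row in enumerate(string.split("/")):
--         expanded = "".join("0" * int(c) if c.isdigit() else c for c in row)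
--         for i, piece in enumerate(expanded):
--             piecePositions[chr(ord('a') + i) + str(8 - rowIndex)] = piece
--     return piecePositions
-- ===== Notes on version B (the rewrite author's own statement) =====
-- stated objective: simpler
-- what changed: Replaces A's prevNum file-offset counter and the nested empty-square insertion loop by two phases per row: expand the row (each digit becomes a run of '0' placeholders) and then a single enumerate pass that assigns square keys by position.
import Mathlib
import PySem

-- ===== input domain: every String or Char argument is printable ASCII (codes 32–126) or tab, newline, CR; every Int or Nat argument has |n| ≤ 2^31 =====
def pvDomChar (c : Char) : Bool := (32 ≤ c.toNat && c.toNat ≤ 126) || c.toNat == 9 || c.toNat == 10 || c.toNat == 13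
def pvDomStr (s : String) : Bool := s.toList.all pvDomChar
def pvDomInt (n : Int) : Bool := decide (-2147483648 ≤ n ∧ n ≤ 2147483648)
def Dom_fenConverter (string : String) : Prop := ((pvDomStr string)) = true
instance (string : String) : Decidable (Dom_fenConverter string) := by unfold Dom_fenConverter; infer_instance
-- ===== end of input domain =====

-- B replaces A's prevNum counter and nested empty-square loop by a per-row expansion pass
-- (digits become runs of '0') followed by one enumerate pass; objective: simpler.

-- ===== PORT A =====
-- square key chr(ord('a') + f) + str(8 - row), built on List Char (kernel-transparent)
def fenKeyA (f : Int) (rowIdx : Int) : String :=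
  String.ofList (Char.ofNat (97 + f).toNat :: PySem.Int.toChars (8 - rowIdx))

-- inner `for col in range(len(boardRows[row]))` loop, carrying prevNum
def fenInnerA (cs : List Char) (rowIdx : Int) (prevNum : Int)
    (d : PySem.Dict String String) : PySem.Dict String String :=
  match cs with
  | [] => d
  | c :: rest =>
    if PySem.Chars.isdigit c then
      -- int(boardRows[row][col]) of a single digit character is its value
      let n : Int := (c.toNat : Int) - 48
      let d' := (PySem.List.pyRange 0 n 1).foldl
        (fun d i => d.insert (fenKeyA (prevNum + i) rowIdx) "0") d
      fenInnerA rest rowIdx (prevNum + n) d'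
    else
      fenInnerA rest rowIdx (prevNum + 1)
        (d.insert (fenKeyA prevNum rowIdx) (String.ofList [c]))

-- outer `for row in range(len(boardRows))` loop; prevNum restarts at 0 each row
def fenOuterA (rows : List (List Char)) (rowIdx : Int)
    (d : PySem.Dict String String) : PySem.Dict String String :=
  match rows with
  | [] => d
  | r :: rs => fenOuterA rs (rowIdx + 1) (fenInnerA r rowIdx 0 d)

def fenConverter (string : String) : List (String × String) :=
  (fenOuterA (PySem.Chars.splitOn string.toList "/".toList) 0 PySem.Dict.empty).items

-- ===== PORT B =====
-- ''.join('0' * int(c) if c.isdigit() else c for c in row)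
def fenExpandRow (row : List Char) : List Char :=
  row.flatMap (fun c =>
    if PySem.Chars.isdigit c then List.replicate (c.toNat - 48) '0' else [c])

-- `for i, piece in enumerate(expanded)` assignment pass (i is the running index)
def fenAssign (ps : List Char) (i : Int) (rowIdx : Int)
    (d : PySem.Dict String String) : PySem.Dict String String :=
  match ps with
  | [] => d
  | p :: rest =>
    fenAssign rest (i + 1) rowIdx
      (d.insert (String.ofList (Char.ofNat (97 + i).toNat :: PySem.Int.toChars (8 - rowIdx)))
                (String.ofList [p]))

-- `for rowIndex, row in enumerate(string.split("/"))`
def fenOuterB (rows : List (List Char)) (rowIdx : Int)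
    (d : PySem.Dict String String) : PySem.Dict String String :=
  match rows with
  | [] => d
  | r :: rs => fenOuterB rs (rowIdx + 1) (fenAssign (fenExpandRow r) 0 rowIdx d)

def fenConverter_alt (string : String) : List (String × String) :=
  (fenOuterB (PySem.Chars.splitOn string.toList "/".toList) 0 PySem.Dict.empty).items

-- ===== PRECONDITION & SPEC =====
def Spec_fenConverter (string : String) (out : List (String × String)) : Prop := out = fenConverter_alt string
instance (string : String) (out : List (String × String)) : Decidable (Spec_fenConverter string out) := by unfold Spec_fenConverter; infer_instance

-- ===== CLAIM (what is proved, stated in full; the proofs are below) =====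
def Claim_equal_fenConverter : Prop := ∀ (string : String), Dom_fenConverter string → Spec_fenConverter string (fenConverter string)

-- ===== LEMMAS AND PROOFS =====

-- B's assignment pass over a concatenation: do the first part, then the second from the shifted index
theorem fenAssign_append (l1 l2 : List Char) (i rowIdx : Int) (d : PySem.Dict String String) :
    fenAssign (l1 ++ l2) i rowIdx d
      = fenAssign l2 (i + l1.length) rowIdx (fenAssign l1 i rowIdx d) := by
  induction l1 generalizing i d with
  | nil => simp [fenAssign]
  | cons c cs ih =>
    simp only [List.cons_append, fenAssign, ih, List.length_cons]
    have h1 : i + 1 + (cs.length : Int) = i + ((cs.length + 1 : Nat) : Int) := by push_cast; ring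
    rw [h1]

-- A's run of m empty squares starting at file p is B's assignment pass over '0'*m from index p
theorem fenInner_run (m : Nat) (p rowIdx : Int) (d : PySem.Dict String String) :
    (PySem.List.pyRange 0 (m : Int) 1).foldl
        (fun d i => d.insert (fenKeyA (p + i) rowIdx) "0") d
      = fenAssign (List.replicate m '0') p rowIdx d := by
  induction m generalizing d with
  | zero => simp [PySem.List.pyRange, fenAssign]
  | succ k ih =>
    rw [show ((k + 1 : Nat) : Int) = (k : Int) + 1 by push_cast; ring,
        PySem.List.pyRange_one_succ_right (by positivity),
        List.replicate_succ' , List.foldl_append, fenAssign_append, ih]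
    simp only [List.foldl_cons, List.foldl_nil, fenAssign, fenKeyA, List.length_replicate]

-- the per-row equivalence: A's prevNum walk = B's expand-then-assign, from any starting file p
theorem fenInner_eq (cs : List Char) (rowIdx p : Int) (d : PySem.Dict String String) :
    fenInnerA cs rowIdx p d = fenAssign (fenExpandRow cs) p rowIdx d := by
  induction cs generalizing p d with
  | nil => simp [fenInnerA, fenExpandRow, fenAssign]
  | cons c rest ih =>
    by_cases h : PySem.Chars.isdigit c = true
    · have hc : 48 ≤ c.toNat ∧ c.toNat ≤ 57 := by
        simp [PySem.Chars.isdigit] at h; exact ⟨h.1, h.2⟩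
      have hn : ((c.toNat : Int) - 48) = ((c.toNat - 48 : Nat) : Int) := by omega
      simp only [fenInnerA, h, if_pos, fenExpandRow, List.flatMap_cons]
      rw [hn, fenInner_run, ih, ← fenExpandRow, fenAssign_append]
      simp
    · simp only [fenInnerA, h, if_neg, fenExpandRow, List.flatMap_cons, Bool.false_eq_true,
        not_false_iff, List.singleton_append]
      rw [ih, ← fenExpandRow, fenAssign]
      simp [fenKeyA]

theorem fenOuter_eq (rows : List (List Char)) (rowIdx : Int) (d : PySem.Dict String String) :
    fenOuterA rows rowIdx d = fenOuterB rows rowIdx d := by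
  induction rows generalizing rowIdx d with
  | nil => rfl
  | cons r rs ih => simp [fenOuterA, fenOuterB, fenInner_eq, ih]

-- ===== VERDICT (by name: the statement is the Claim_ definition above) =====
theorem fenConverter_spec : Claim_equal_fenConverter := by
  intro s _
  unfold Spec_fenConverter fenConverter fenConverter_alt
  rw [fenOuter_eq]
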